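-- pv_equiv track=rewrite | github.com/dohaahi/Programmers | 프로그래머스/1/42840. 모의고사/모의고사.py | solution
-- ===== SOURCE A (Python) =====
-- def solution(answers):
--     answer = []
--
--     p1 = [1, 2, 3, 4, 5][:len(answers)] if len(answers) < 5 else ([1, 2, 3, 4, 5] * ((len(answers) // 5) + 1))[
--                                                                  :len(answers)]
--     p2 = [2, 1, 2, 3, 2, 4, 2, 5][:len(answers)] if len(answers) <= 8 else ([2, 1, 2, 3, 2, 4, 2, 5] * ((
--                                                                                                                 len(answers) // 8) + 1))[
--                                                                            : len(answers)]
--     p3 = [3, 3, 1, 1, 2, 2, 4, 4, 5, 5][:len(answers)] if len(answers) <= 10 else ([3, 3, 1, 1, 2, 2, 4, 4, 5, 5] * ((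
--                                                                                                                              len(answers) // 10) + 1))[
--                                                                                   :len(answers)]
--
--     count = [0, 0, 0]
--
--     for z, x, c, a in zip(p1, p2, p3, answers):
--         if z == a:
--             count[0] += 1
--         if x == a:
--             count[1] += 1
--         if c == a:
--             count[2] += 1
--
--     for i in range(len(count)):
--         max_num = max(count)
--
--         if max_num == 0:
--             return []
--         if count[i] == max_num: \
--                 answer.append(i + 1)
--
--     return answer
-- ===== SOURCE B (Python) =====
-- def solution(answers):
--     # Residue histogram: one pass over answers keyed by (index mod 40, value);
--     # 40 = lcm(5, 8, 10), so each pattern's score is read off from 40 buckets.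
--     hist = {}
--     for i, a in enumerate(answers):
--         k = (i % 40, a)
--         hist[k] = hist.get(k, 0) + 1
--     patterns = [[1, 2, 3, 4, 5], [2, 1, 2, 3, 2, 4, 2, 5], [3, 3, 1, 1, 2, 2, 4, 4, 5, 5]]
--     scores = [sum(hist.get((r, p[r % len(p)]), 0) for r in range(40))
--               for p in patterns]
--     m = max(scores)
--     return [] if m == 0 else [i + 1 for i, s in enumerate(scores) if s == m]
-- ===== Notes on version B (the rewrite author's own statement) =====
-- stated objective: alternative
-- what changed: A tiles each pattern to the answers' length and counts matches in one combined zip pass over pre-padded lists; B never materialises or scans patterns against answers: it builds a histogram keyed by (index mod 40, value) in a single pass (40 = lcm of the pattern lengths) and reads each pattern's score off 40 histogram buckets.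
import Mathlib
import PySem

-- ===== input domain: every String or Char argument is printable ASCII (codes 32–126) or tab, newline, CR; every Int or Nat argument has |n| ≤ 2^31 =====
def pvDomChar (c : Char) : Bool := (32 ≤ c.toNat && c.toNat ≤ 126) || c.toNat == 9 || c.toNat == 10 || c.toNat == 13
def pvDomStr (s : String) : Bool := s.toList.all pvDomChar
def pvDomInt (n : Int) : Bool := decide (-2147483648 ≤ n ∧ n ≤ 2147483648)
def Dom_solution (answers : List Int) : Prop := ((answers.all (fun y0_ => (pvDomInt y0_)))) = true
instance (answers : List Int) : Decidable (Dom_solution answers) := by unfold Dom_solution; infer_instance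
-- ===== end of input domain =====

-- B replaces A's tiled-pattern zip pass by a residue histogram keyed by (i % 40, value)
-- built in one pass (40 = lcm 5 8 10); each score is then read from 40 buckets (objective: alternative).

-- ===== PORT A =====
-- second loop of A: for i in range(len(count)): max_num = max(count); if max_num == 0: return []; …
-- (max(count) never raises: count is always the 3-element list built below)
def pvALoop (count : List Int) (idxs : List Nat) (answer : List Int) : List Int :=
  match idxs with
  | [] => answer
  | i :: rest =>
      let maxNum := (PySem.List.max? count id).getD 0
      if maxNum = 0 then []
      else pvALoop count rest (if count.getD i 0 = maxNum then answer ++ [(i : Int) + 1] else answer)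

def solution (answers : List Int) : List Int :=
  let n : Int := (answers.length : Int)
  let p1 := if answers.length < 5 then PySem.List.slice ([1,2,3,4,5] : List Int) none (some n)
            else PySem.List.slice (PySem.List.pyRepeat ([1,2,3,4,5] : List Int) (PySem.Int.floordiv n 5 + 1)) none (some n)
  let p2 := if answers.length ≤ 8 then PySem.List.slice ([2,1,2,3,2,4,2,5] : List Int) none (some n)
            else PySem.List.slice (PySem.List.pyRepeat ([2,1,2,3,2,4,2,5] : List Int) (PySem.Int.floordiv n 8 + 1)) none (some n)
  let p3 := if answers.length ≤ 10 then PySem.List.slice ([3,3,1,1,2,2,4,4,5,5] : List Int) none (some n)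
            else PySem.List.slice (PySem.List.pyRepeat ([3,3,1,1,2,2,4,4,5,5] : List Int) (PySem.Int.floordiv n 10 + 1)) none (some n)
  -- for z, x, c, a in zip(p1, p2, p3, answers): three independent counters (count[0], count[1], count[2])
  let count := (p1.zip (p2.zip (p3.zip answers))).foldl
      (fun (c : Int × Int × Int) zxca =>
        (if zxca.1 = zxca.2.2.2 then c.1 + 1 else c.1,
         if zxca.2.1 = zxca.2.2.2 then c.2.1 + 1 else c.2.1,
         if zxca.2.2.1 = zxca.2.2.2 then c.2.2 + 1 else c.2.2)) (0, 0, 0)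
  pvALoop [count.1, count.2.1, count.2.2] [0, 1, 2] []

-- ===== PORT B =====
-- hist = {}; for i, a in enumerate(answers): k = (i % 40, a); hist[k] = hist.get(k, 0) + 1
def pvHist (answers : List Int) : PySem.Dict (Int × Int) Int :=
  (PySem.List.enumerate answers).foldl
    (fun d ia =>
      let k := (PySem.Int.mod ia.1 40, ia.2)
      d.insert k (d.getD k 0 + 1))
    PySem.Dict.empty

-- sum(hist.get((r, p[r % len(p)]), 0) for r in range(40))
def pvScoreB (hist : PySem.Dict (Int × Int) Int) (p : List Int) : Int :=
  ((PySem.List.pyRange 0 40 1).map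
      (fun r => hist.getD (r, PySem.List.pyGetD p (PySem.Int.mod r (p.length : Int)) 0) 0)).sum

def solution_alt (answers : List Int) : List Int :=
  let hist := pvHist answers
  let patterns : List (List Int) := [[1,2,3,4,5], [2,1,2,3,2,4,2,5], [3,3,1,1,2,2,4,4,5,5]]
  let scores := patterns.map (fun p => pvScoreB hist p)
  let m := (PySem.List.max? scores id).getD 0
  if m = 0 then []
  else (PySem.List.enumerate scores).filterMap (fun is => if is.2 = m then some (is.1 + 1) else none)

-- ===== PRECONDITION & SPEC =====
def Spec_solution (answers : List Int) (out : List Int) : Prop := out = solution_alt answers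
instance (answers : List Int) (out : List Int) : Decidable (Spec_solution answers out) := by unfold Spec_solution; infer_instance

-- ===== CLAIM (what is proved, stated in full; the proofs are below) =====
def Claim_equal_solution : Prop := ∀ (answers : List Int), Dom_solution answers → Spec_solution answers (solution answers)

-- ===== LEMMAS AND PROOFS =====

-- canonical per-pattern score: index-wise modular comparison
def specScore (base : List Int) (answers : List Int) : Int :=
  ((List.range answers.length).map (fun i =>
      if base.getD (i % base.length) 0 = answers.getD i 0 then (1 : Int) else 0)).sum

-- ---------- A side: padded patterns are modular-index maps, fold splits ----------

-- a prefix of base itself is the modular-index map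
lemma take_eq_modmap (base : List Int) (n : Nat) (h : n ≤ base.length) :
    base.take n = (List.range n).map (fun i => base.getD (i % base.length) 0) := by
  apply List.ext_getElem
  · simp [Nat.min_eq_left h]
  · intro i h1 h2
    have hi : i < n := by simpa using h2
    have hib : i < base.length := lt_of_lt_of_le hi h
    simp [List.getElem_take, Nat.mod_eq_of_lt hib, List.getD_eq_getElem?_getD,
      List.getElem?_eq_getElem hib]

lemma flatten_replicate_getD (base : List Int) :
    ∀ (k i : Nat), i < k * base.length →
    ((List.replicate k base).flatten).getD i 0 = base.getD (i % base.length) 0 := by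
  intro k
  induction k with
  | zero => intro i hi; simp at hi
  | succ k ih =>
      intro i hi
      have hmul : (k + 1) * base.length = k * base.length + base.length := by ring
      rw [List.replicate_succ, List.flatten_cons]
      by_cases hib : i < base.length
      · rw [List.getD_append _ _ _ _ hib, Nat.mod_eq_of_lt hib]
      · replace hib := Nat.le_of_not_lt hib
        rw [List.getD_append_right _ _ _ _ hib, ih (i - base.length) (by omega)]
        rw [Nat.mod_eq_sub_mod hib]

-- a prefix of base * k is the modular-index map
lemma repeat_take_eq_modmap (base : List Int) (k n : Nat) (h : n ≤ k * base.length) :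
    ((List.replicate k base).flatten).take n
      = (List.range n).map (fun i => base.getD (i % base.length) 0) := by
  have hlen : ((List.replicate k base).flatten).length = k * base.length := by
    simp [List.length_flatten]
  apply List.ext_getElem
  · simp [hlen, Nat.min_eq_left h]
  · intro i h1 h2
    have hi : i < n := by simpa using h2
    have hik : i < k * base.length := lt_of_lt_of_le hi h
    rw [List.getElem_take, List.getElem_map, List.getElem_range]
    have := flatten_replicate_getD base k i hik
    rw [List.getD_eq_getElem?_getD, List.getElem?_eq_getElem (by omega)] at this
    simpa using this

-- both branches of A's padding are the modular-index map
lemma slice_base_eq (base : List Int) (n : Nat) (h : n ≤ base.length) :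
    PySem.List.slice base none (some (n : Int))
      = (List.range n).map (fun i => base.getD (i % base.length) 0) := by
  rw [PySem.List.slice_to_natCast]
  exact take_eq_modmap base n h

lemma pyRepeat_slice_eq (base : List Int) (n : Nat) (kz : Int)
    (hk : n ≤ kz.toNat * base.length) :
    PySem.List.slice (PySem.List.pyRepeat base kz) none (some (n : Int))
      = (List.range n).map (fun i => base.getD (i % base.length) 0) := by
  rw [PySem.List.slice_to_natCast]
  simp only [PySem.List.pyRepeat]
  exact repeat_take_eq_modmap base kz.toNat n hk

-- the triple fold splits into three independent 0/1 sums
lemma fold_triple (l : List (Int × Int × Int × Int)) :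
    ∀ (c : Int × Int × Int),
    l.foldl (fun (c : Int × Int × Int) zxca =>
        (if zxca.1 = zxca.2.2.2 then c.1 + 1 else c.1,
         if zxca.2.1 = zxca.2.2.2 then c.2.1 + 1 else c.2.1,
         if zxca.2.2.1 = zxca.2.2.2 then c.2.2 + 1 else c.2.2)) c
      = (c.1 + (l.map (fun q => if q.1 = q.2.2.2 then (1:Int) else 0)).sum,
         c.2.1 + (l.map (fun q => if q.2.1 = q.2.2.2 then (1:Int) else 0)).sum,
         c.2.2 + (l.map (fun q => if q.2.2.1 = q.2.2.2 then (1:Int) else 0)).sum) := by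
  induction l with
  | nil => intro c; simp
  | cons q l ih =>
      intro c
      rw [List.foldl_cons, ih]
      simp only [List.map_cons, List.sum_cons, Prod.ext_iff]
      split_ifs <;> omega

-- the final selection stage agrees for any three scores
set_option maxRecDepth 8192 in
lemma final_eq (s1 s2 s3 : Int) :
    pvALoop [s1, s2, s3] [0, 1, 2] []
      = (let m := (PySem.List.max? [s1, s2, s3] id).getD 0
         if m = 0 then []
         else (PySem.List.enumerate [s1, s2, s3]).filterMap
                (fun is => if is.2 = m then some (is.1 + 1) else none)) := by
  show pvALoop _ _ _ = _
  rw [pvALoop, pvALoop, pvALoop, pvALoop]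
  simp only [PySem.List.max?, PySem.List.enumerate_cons, PySem.List.enumerate_nil, List.foldl,
    List.filterMap, List.getD, List.getElem?_cons_zero, List.getElem?_cons_succ, id]
  by_cases h12 : s1 < s2 <;> by_cases h23 : s2 < s3 <;> by_cases h13 : s1 < s3 <;>
    simp [h12, h23, h13] <;> split_ifs <;> simp_all

-- the four-way zip of three range-maps with the list itself
lemma zip_maps (answers : List Int) :
    ∀ (f g h : Nat → Int),
    ((List.range answers.length).map f).zip
      (((List.range answers.length).map g).zip
        (((List.range answers.length).map h).zip answers))
      = (List.range answers.length).map (fun i => (f i, g i, h i, answers.getD i 0)) := by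
  induction answers with
  | nil => intro f g h; simp
  | cons a as ih =>
      intro f g h
      rw [List.length_cons, List.range_succ_eq_map]
      simp only [List.map_cons, List.map_map, List.zip_cons_cons]
      congr 1
      simp only [Function.comp_def, List.getD_cons_succ]
      exact ih (fun i => f (i + 1)) (fun i => g (i + 1)) (fun i => h (i + 1))

-- ---------- B side: the histogram score is specScore ----------

-- the keys fed to B's histogram
def pvKeys (answers : List Int) : List (Int × Int) :=
  (PySem.List.enumerate answers).map (fun ia => (PySem.Int.mod ia.1 40, ia.2))

-- B's histogram IS the counter of those keys
lemma pvHist_eq_counter (answers : List Int) :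
    pvHist answers = PySem.Dict.counter (pvKeys answers) := by
  rw [pvHist, pvKeys, ← PySem.Dict.foldl_insert_getD_add_one_eq_counter, List.foldl_map]

-- a sum of counts over distinct keys (r, f r) is a per-item indicator sum
lemma sum_indicator_single (x : Int × Int) (f : Int → Int) :
    ∀ (rs : List Int), rs.Nodup →
    (rs.map (fun r => if x = (r, f r) then (1:Int) else 0)).sum
      = if x.1 ∈ rs ∧ x.2 = f x.1 then (1:Int) else 0 := by
  intro rs
  induction rs with
  | nil => simp
  | cons r rs ih =>
      intro hnd
      rw [List.map_cons, List.sum_cons, ih hnd.of_cons]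
      by_cases hx : x = (r, f r)
      · subst hx
        have hnotin : r ∉ rs := (List.nodup_cons.mp hnd).1
        simp [hnotin]
      · have : (x.1 ∈ r :: rs ∧ x.2 = f x.1) ↔ (x.1 ∈ rs ∧ x.2 = f x.1) := by
          constructor
          · rintro ⟨hm, he⟩
            rcases List.mem_cons.mp hm with h1 | h1
            · exact absurd (Prod.ext h1 (by rw [he, h1])) hx
            · exact ⟨h1, he⟩
          · rintro ⟨hm, he⟩; exact ⟨List.mem_cons_of_mem _ hm, he⟩
        simp only [hx, if_false, zero_add, this]

lemma sum_count_eq (rs : List Int) (hnd : rs.Nodup) (f : Int → Int) :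
    ∀ (ks : List (Int × Int)),
    (rs.map (fun r => ((ks.count (r, f r) : Int)))).sum
      = (ks.map (fun x => if x.1 ∈ rs ∧ x.2 = f x.1 then (1:Int) else 0)).sum := by
  intro ks
  induction ks with
  | nil => simp
  | cons x ks ih =>
      simp only [List.count_cons, beq_iff_eq, List.map_cons, List.sum_cons]
      have : (rs.map (fun r => (((ks.count (r, f r) + if x = (r, f r) then 1 else 0 : Nat)) : Int))).sum
          = (rs.map (fun r => ((ks.count (r, f r) : Int)))).sum
            + (rs.map (fun r => if x = (r, f r) then (1:Int) else 0)).sum := by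
        rw [← PySem.List.sum_map_add_int]
        apply congrArg
        apply List.map_congr_left
        intro r _
        push_cast
        by_cases h : x = (r, f r)
        · simp [h]
        · simp [h]
      rw [this, ih, sum_indicator_single x f rs hnd]
      ring

-- per-item indicator over the enumerate keys equals specScore (L ∣ 40, 0 < L)
lemma indicator_sum_eq_spec (p : List Int) (hdvd : p.length ∣ 40) :
    ∀ (answers : List Int) (s : Nat),
    (((PySem.List.enumerate answers (s : Int)).map
        (fun ia => (PySem.Int.mod ia.1 40, ia.2))).map
      (fun x => if x.1 ∈ PySem.List.pyRange 0 40 1 ∧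
                   x.2 = PySem.List.pyGetD p (PySem.Int.mod x.1 (p.length : Int)) 0
                then (1:Int) else 0)).sum
    = ((List.range answers.length).map (fun i =>
        if p.getD ((s + i) % p.length) 0 = answers.getD i 0 then (1 : Int) else 0)).sum := by
  intro answers
  induction answers with
  | nil => intro s; simp [PySem.List.enumerate_nil]
  | cons a as ih =>
      intro s
      rw [PySem.List.enumerate_cons]
      have hcast : ((s : Int) + 1) = ((s + 1 : Nat) : Int) := by push_cast; ring
      rw [List.map_cons, List.map_cons, List.sum_cons, hcast, ih (s + 1)]
      -- head term
      have hmod40 : PySem.Int.mod ((s : Int)) 40 = ((s % 40 : Nat) : Int) := by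
        exact_mod_cast PySem.Int.mod_natCast s 40
      have hmem : ((s % 40 : Nat) : Int) ∈ PySem.List.pyRange 0 40 1 := by
        rw [PySem.List.mem_pyRange_one]
        constructor
        · positivity
        · exact_mod_cast Nat.mod_lt s (by norm_num)
      have hmodL : PySem.Int.mod ((s % 40 : Nat) : Int) ((p.length : Nat) : Int)
          = ((s % 40 % p.length : Nat) : Int) := PySem.Int.mod_natCast _ _
      have hmm : s % 40 % p.length = s % p.length := Nat.mod_mod_of_dvd s hdvd
      have hhead : (if (PySem.Int.mod ((s : Int)) 40 ∈ PySem.List.pyRange 0 40 1 ∧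
              a = PySem.List.pyGetD p (PySem.Int.mod (PySem.Int.mod ((s : Int)) 40) (p.length : Int)) 0)
            then (1:Int) else 0)
          = if p.getD (s % p.length) 0 = a then (1:Int) else 0 := by
        rw [hmod40, hmodL, hmm, PySem.List.pyGetD_natCast]
        simp only [hmem, true_and]
        rcases eq_or_ne a (p.getD (s % p.length) 0) with h | h
        · rw [h]
        · rw [if_neg h, if_neg h.symm]
      rw [hhead]
      rw [List.length_cons, List.range_succ_eq_map, List.map_cons, List.sum_cons, List.map_map]
      simp only [List.getD_cons_zero, Nat.add_zero]
      congr 1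
      apply congrArg
      apply List.map_congr_left
      intro i _
      simp only [Function.comp]
      have h1 : s + 1 + i = s + (i + 1) := by omega
      rw [h1]
      simp

-- pyRange 0 40 1 over Int as a sum of counts: B's score is specScore
lemma pvScoreB_eq_spec (answers : List Int) (p : List Int)
    (hdvd : p.length ∣ 40) :
    pvScoreB (pvHist answers) p = specScore p answers := by
  rw [pvScoreB, pvHist_eq_counter]
  have hcounts : ((PySem.List.pyRange 0 40 1).map
      (fun r => (PySem.Dict.counter (pvKeys answers)).getD
        (r, PySem.List.pyGetD p (PySem.Int.mod r (p.length : Int)) 0) 0)).sum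
      = ((PySem.List.pyRange 0 40 1).map
      (fun r => ((pvKeys answers).count
        (r, PySem.List.pyGetD p (PySem.Int.mod r (p.length : Int)) 0) : Int))).sum := by
    apply congrArg
    apply List.map_congr_left
    intro r _
    exact PySem.Dict.getD_counter _ _
  rw [hcounts,
    sum_count_eq (PySem.List.pyRange 0 40 1) (by decide)
      (fun r => PySem.List.pyGetD p (PySem.Int.mod r (p.length : Int)) 0) (pvKeys answers)]
  have := indicator_sum_eq_spec p hdvd answers 0
  simpa [pvKeys, specScore] using this

-- ---------- main equivalence ----------

theorem solution_eq_alt (answers : List Int) : solution answers = solution_alt answers := by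
  -- the three padded patterns of A are modular-index maps
  have hp1 : (if answers.length < 5 then
                PySem.List.slice ([1,2,3,4,5] : List Int) none (some (answers.length : Int))
              else PySem.List.slice (PySem.List.pyRepeat ([1,2,3,4,5] : List Int)
                     (PySem.Int.floordiv (answers.length : Int) 5 + 1)) none (some (answers.length : Int)))
      = (List.range answers.length).map
          (fun i => ([1,2,3,4,5] : List Int).getD (i % ([1,2,3,4,5] : List Int).length) 0) := by
    split_ifs with h
    · exact slice_base_eq _ _ (by simp; omega)
    · have hfd : PySem.Int.floordiv (answers.length : Int) 5 + 1
          = ((answers.length / 5 + 1 : Nat) : Int) := by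
        have := PySem.Int.floordiv_natCast answers.length 5
        push_cast at this ⊢; omega
      rw [hfd]
      exact pyRepeat_slice_eq _ _ _ (by simp; omega)
  have hp2 : (if answers.length ≤ 8 then
                PySem.List.slice ([2,1,2,3,2,4,2,5] : List Int) none (some (answers.length : Int))
              else PySem.List.slice (PySem.List.pyRepeat ([2,1,2,3,2,4,2,5] : List Int)
                     (PySem.Int.floordiv (answers.length : Int) 8 + 1)) none (some (answers.length : Int)))
      = (List.range answers.length).map
          (fun i => ([2,1,2,3,2,4,2,5] : List Int).getD (i % ([2,1,2,3,2,4,2,5] : List Int).length) 0) := by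
    split_ifs with h
    · exact slice_base_eq _ _ (by simp; omega)
    · have hfd : PySem.Int.floordiv (answers.length : Int) 8 + 1
          = ((answers.length / 8 + 1 : Nat) : Int) := by
        have := PySem.Int.floordiv_natCast answers.length 8
        push_cast at this ⊢; omega
      rw [hfd]
      exact pyRepeat_slice_eq _ _ _ (by simp; omega)
  have hp3 : (if answers.length ≤ 10 then
                PySem.List.slice ([3,3,1,1,2,2,4,4,5,5] : List Int) none (some (answers.length : Int))
              else PySem.List.slice (PySem.List.pyRepeat ([3,3,1,1,2,2,4,4,5,5] : List Int)
                     (PySem.Int.floordiv (answers.length : Int) 10 + 1)) none (some (answers.length : Int)))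
      = (List.range answers.length).map
          (fun i => ([3,3,1,1,2,2,4,4,5,5] : List Int).getD (i % ([3,3,1,1,2,2,4,4,5,5] : List Int).length) 0) := by
    split_ifs with h
    · exact slice_base_eq _ _ (by simp; omega)
    · have hfd : PySem.Int.floordiv (answers.length : Int) 10 + 1
          = ((answers.length / 10 + 1 : Nat) : Int) := by
        have := PySem.Int.floordiv_natCast answers.length 10
        push_cast at this ⊢; omega
      rw [hfd]
      exact pyRepeat_slice_eq _ _ _ (by simp; omega)
  show solution answers = solution_alt answers
  rw [solution, solution_alt]
  rw [hp1, hp2, hp3, zip_maps, fold_triple]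
  have hs1 := pvScoreB_eq_spec answers [1,2,3,4,5] (by decide)
  have hs2 := pvScoreB_eq_spec answers [2,1,2,3,2,4,2,5] (by decide)
  have hs3 := pvScoreB_eq_spec answers [3,3,1,1,2,2,4,4,5,5] (by decide)
  simp only [List.map_cons, List.map_nil, hs1, hs2, hs3]
  rw [final_eq]
  simp [specScore, Function.comp_def]

-- ===== VERDICT (by name: the statement is the Claim_ definition above) =====
theorem solution_spec : Claim_equal_solution := by
  intro answers _
  unfold Spec_solution
  exact solution_eq_alt answers
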